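-- pv_equiv track=rewrite | github.com/AlgoLab/cancer_gp | dollo_node_operators.py | sets_are_equal
-- ===== SOURCE A (Python) =====
-- def sets_are_equal(set1,set2):
--     """ Checks if sets are equal
--
--     Args:
--         set1 (set): first set for comparison.
--         set2 (set): second set for comparison.
--
--     Returns:
--         boolean that indicate equality of the sets
--     """
--     for x in set1:
--         if( not x in set2):
--             return False;
--     for x in set2:
--         if( not x in set1):
--             return False;
--     return True
-- ===== SOURCE B (Python) =====
-- def sets_are_equal(set1, set2):
--     """Checks if sets are equal (idiomatic: cardinality guard + one containment pass)."""
--     s1 = set(set1)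
--     s2 = set(set2)
--     return len(s1) == len(s2) and all(x in s2 for x in s1)
-- ===== Notes on version B (the rewrite author's own statement) =====
-- stated objective: idiomatic
-- what changed: Replaces the two symmetric membership loops by deduplicating both inputs once and checking equal cardinality plus a single one-directional containment pass.
import Mathlib
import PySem

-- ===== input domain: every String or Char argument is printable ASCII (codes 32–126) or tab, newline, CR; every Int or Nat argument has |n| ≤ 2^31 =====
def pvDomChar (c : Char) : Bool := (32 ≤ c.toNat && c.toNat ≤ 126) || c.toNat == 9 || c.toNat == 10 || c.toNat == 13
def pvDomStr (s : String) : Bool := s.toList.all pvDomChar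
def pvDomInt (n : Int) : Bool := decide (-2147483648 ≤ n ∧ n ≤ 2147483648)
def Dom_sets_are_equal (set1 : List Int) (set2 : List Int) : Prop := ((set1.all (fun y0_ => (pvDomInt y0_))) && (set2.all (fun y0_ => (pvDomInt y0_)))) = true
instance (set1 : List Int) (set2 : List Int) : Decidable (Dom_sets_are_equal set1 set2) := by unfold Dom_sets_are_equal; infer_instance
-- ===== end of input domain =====

-- B replaces A's two symmetric membership loops by a one-pass check: dedup both inputs,
-- compare cardinalities, then verify one-directional containment (idiomatic rewrite).

-- ===== PORT A =====
-- 'for x in set1: if not x in set2: return False' — early-exit loop = List.all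
def sets_are_equal (set1 : List Int) (set2 : List Int) : Bool :=
  if !(set1.all (fun x => set2.contains x)) then false
  else if !(set2.all (fun x => set1.contains x)) then false
  else true

-- ===== PORT B =====
def sets_are_equal_alt (set1 : List Int) (set2 : List Int) : Bool :=
  let s1 : PySem.Set Int := PySem.Set.ofList set1
  let s2 : PySem.Set Int := PySem.Set.ofList set2
  (PySem.Set.len s1 == PySem.Set.len s2) && s1.all (fun x => PySem.Set.contains s2 x)

-- ===== PRECONDITION & SPEC =====
def Spec_sets_are_equal (set1 : List Int) (set2 : List Int) (out : Bool) : Prop := out = sets_are_equal_alt set1 set2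
instance (set1 : List Int) (set2 : List Int) (out : Bool) : Decidable (Spec_sets_are_equal set1 set2 out) := by unfold Spec_sets_are_equal; infer_instance

-- ===== CLAIM (what is proved, stated in full; the proofs are below) =====
def Claim_equal_sets_are_equal : Prop := ∀ (set1 : List Int) (set2 : List Int), Dom_sets_are_equal set1 set2 → Spec_sets_are_equal set1 set2 (sets_are_equal set1 set2)

-- ===== LEMMAS AND PROOFS =====

-- Two nodup lists with equal length, one contained in the other, have the same members.
theorem nodup_len_subset_symm {a b : List Int} (ha : a.Nodup) (hb : b.Nodup)
    (hlen : a.length = b.length) (hsub : ∀ x ∈ a, x ∈ b) : ∀ x ∈ b, x ∈ a := by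
  have hfs : a.toFinset ⊆ b.toFinset := by
    intro x hx
    simp only [List.mem_toFinset] at *
    exact hsub x hx
  have hcard : b.toFinset.card ≤ a.toFinset.card := by
    rw [List.toFinset_card_of_nodup ha, List.toFinset_card_of_nodup hb, hlen]
  have := Finset.eq_of_subset_of_card_le hfs hcard
  intro x hx
  have : x ∈ a.toFinset := this ▸ List.mem_toFinset.mpr hx
  exact List.mem_toFinset.mp this

theorem A_iff (set1 set2 : List Int) :
    sets_are_equal set1 set2 = true ↔ (∀ x ∈ set1, x ∈ set2) ∧ (∀ x ∈ set2, x ∈ set1) := by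
  simp [sets_are_equal]

theorem B_iff (set1 set2 : List Int) :
    sets_are_equal_alt set1 set2 = true ↔ (∀ x ∈ set1, x ∈ set2) ∧ (∀ x ∈ set2, x ∈ set1) := by
  simp only [sets_are_equal_alt, Bool.and_eq_true, beq_iff_eq, List.all_eq_true,
    PySem.Set.contains_eq_listContains, List.contains_iff_mem]
  constructor
  · rintro ⟨hlen, hsub⟩
    have hsub' : ∀ x ∈ PySem.Set.ofList set1, x ∈ PySem.Set.ofList set2 := hsub
    have hlen' : (PySem.Set.ofList set1).length = (PySem.Set.ofList set2).length := by
      simpa [PySem.Set.len] using hlen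
    have hback := nodup_len_subset_symm (PySem.Set.nodup_ofList (xs := set1))
      (PySem.Set.nodup_ofList (xs := set2)) hlen' hsub'
    exact ⟨fun x hx => (PySem.Set.mem_ofList _ _).mp (hsub' x ((PySem.Set.mem_ofList _ _).mpr hx)),
           fun x hx => (PySem.Set.mem_ofList _ _).mp (hback x ((PySem.Set.mem_ofList _ _).mpr hx))⟩
  · rintro ⟨h12, h21⟩
    refine ⟨?_, fun x hx => (PySem.Set.mem_ofList _ _).mpr (h12 x ((PySem.Set.mem_ofList _ _).mp hx))⟩
    have hperm : (PySem.Set.ofList set1).Perm (PySem.Set.ofList set2) :=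
      (List.perm_ext_iff_of_nodup (PySem.Set.nodup_ofList (xs := set1))
        (PySem.Set.nodup_ofList (xs := set2))).mpr (fun x => by
          simp only [PySem.Set.mem_ofList _ _]
          exact ⟨fun h => h12 x h, fun h => h21 x h⟩)
    simpa [PySem.Set.len] using hperm.length_eq

theorem sets_are_equal_eq_alt (set1 set2 : List Int) :
    sets_are_equal set1 set2 = sets_are_equal_alt set1 set2 := by
  have := (A_iff set1 set2).trans (B_iff set1 set2).symm
  exact Bool.coe_iff_coe.mp this

-- ===== VERDICT (by name: the statement is the Claim_ definition above) =====
theorem sets_are_equal_spec : Claim_equal_sets_are_equal := by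
  intro set1 set2 _
  unfold Spec_sets_are_equal
  exact sets_are_equal_eq_alt set1 set2
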